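-- pv_equiv track=rewrite | github.com/martiCaceresh/ruteoVehiculos_algoritmia_genetico | algoritmo_genetico.py | rutas_repetidas
-- ===== SOURCE A (Python) =====
-- def iguales(ruta1,ruta2):
-- 	size1=len(ruta1)
-- 	if size1!=len(ruta2):
-- 		return False
--
-- 	else:
-- 		for i in range(size1):
-- 			if ruta1[i]!=ruta2[i]:
-- 				return False
--
--
-- 	return True
--
-- def rutas_repetidas(individuo):
-- 	size=len(individuo)
-- 	for i in range(size-1):
-- 		temp=individuo[i]
-- 		for j in range(i+1,size):
-- 			if iguales(temp,individuo[j]):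
-- 				return True
--
-- 	return False
-- ===== SOURCE B (Python) =====
-- def rutas_repetidas(individuo):
--     buckets = {}
--     for ruta in individuo:
--         bucket = buckets.setdefault(len(ruta), [])
--         for vista in bucket:
--             for x, y in zip(vista, ruta):
--                 if x != y:
--                     break
--             else:
--                 return True
--         bucket.append(ruta)
--     return False
-- ===== Notes on version B (the rewrite author's own statement) =====
-- stated objective: alternative
-- what changed: Replaces A's nested index loops that compare every pair of routes with a single forward pass that buckets routes by length in a dict and compares each route element-wise only against previously seen routes of the same length.
import Mathlib
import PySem

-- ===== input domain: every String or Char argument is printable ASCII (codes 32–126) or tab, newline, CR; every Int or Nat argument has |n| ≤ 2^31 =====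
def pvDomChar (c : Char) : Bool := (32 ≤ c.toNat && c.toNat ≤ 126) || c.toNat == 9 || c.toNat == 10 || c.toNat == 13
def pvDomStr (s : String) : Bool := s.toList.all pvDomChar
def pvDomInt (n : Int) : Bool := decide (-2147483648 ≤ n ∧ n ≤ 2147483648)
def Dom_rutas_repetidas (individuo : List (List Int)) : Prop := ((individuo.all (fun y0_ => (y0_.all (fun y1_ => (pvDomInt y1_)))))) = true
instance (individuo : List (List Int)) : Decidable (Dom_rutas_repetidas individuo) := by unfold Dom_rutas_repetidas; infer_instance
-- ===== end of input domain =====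

-- B replaces A's quadratic all-pairs index scan with a single pass that buckets routes
-- by length in a dict and compares each route element-wise only against earlier routes
-- of the same length (objective: alternative — a differently shaped single pass).

-- ===== PORT A =====
-- inner loop of `iguales`: for i in range(size1): if ruta1[i] != ruta2[i]: return False
def pvIgLoop (r1 r2 : List Int) : List Int → Bool
  | [] => true
  | i :: rest => if PySem.List.pyGetD r1 i 0 ≠ PySem.List.pyGetD r2 i 0 then false
                 else pvIgLoop r1 r2 rest

def iguales (ruta1 ruta2 : List Int) : Bool :=
  if ruta1.length ≠ ruta2.length then false
  else pvIgLoop ruta1 ruta2 (PySem.List.pyRange 0 (ruta1.length : Int) 1)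

-- inner loop: for j in range(i+1, size): if iguales(temp, individuo[j]): return True
def pvJLoop (ind : List (List Int)) (temp : List Int) : List Int → Bool
  | [] => false
  | j :: rest => if iguales temp (PySem.List.pyGetD ind j []) then true
                 else pvJLoop ind temp rest

-- outer loop: for i in range(size-1): temp = individuo[i]; …
def pvILoop (ind : List (List Int)) : List Int → Bool
  | [] => false
  | i :: rest =>
    let temp := PySem.List.pyGetD ind i []
    if pvJLoop ind temp (PySem.List.pyRange (i + 1) (ind.length : Int) 1) then true
    else pvILoop ind rest

def rutas_repetidas (individuo : List (List Int)) : Bool :=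
  pvILoop individuo (PySem.List.pyRange 0 ((individuo.length : Int) - 1) 1)

-- ===== PORT B =====
-- `for x, y in zip(vista, ruta): if x != y: break / else: return True`
def pvSame : List Int → List Int → Bool
  | x :: xs, y :: ys => if x ≠ y then false else pvSame xs ys
  | _, _ => true

-- scan of the length-bucket: for vista in bucket: …
def pvScanBucket (r : List Int) : List (List Int) → Bool
  | [] => false
  | vista :: rest => if pvSame vista r then true else pvScanBucket r rest

-- main loop over the routes, carrying the dict of length-buckets
def pvBLoop (buckets : PySem.Dict Int (List (List Int))) : List (List Int) → Bool
  | [] => false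
  | r :: rest =>
    let bucket := buckets.getD (r.length : Int) []
    if pvScanBucket r bucket then true
    else pvBLoop (buckets.insert (r.length : Int) (bucket ++ [r])) rest

def rutas_repetidas_alt (individuo : List (List Int)) : Bool :=
  pvBLoop PySem.Dict.empty individuo

-- ===== PRECONDITION & SPEC =====
def Spec_rutas_repetidas (individuo : List (List Int)) (out : Bool) : Prop := out = rutas_repetidas_alt individuo
instance (individuo : List (List Int)) (out : Bool) : Decidable (Spec_rutas_repetidas individuo out) := by unfold Spec_rutas_repetidas; infer_instance

-- ===== CLAIM (what is proved, stated in full; the proofs are below) =====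
def Claim_equal_rutas_repetidas : Prop := ∀ (individuo : List (List Int)), Dom_rutas_repetidas individuo → Spec_rutas_repetidas individuo (rutas_repetidas individuo)

-- ===== LEMMAS AND PROOFS =====

-- reference: "some route appears again later"
def pvDup : List (List Int) → Bool
  | [] => false
  | x :: xs => xs.contains x || pvDup xs

lemma pvDup_eq_not_nodup (l : List (List Int)) : pvDup l = decide (¬ l.Nodup) := by
  induction l with
  | nil => simp [pvDup]
  | cons x xs ih =>
      by_cases h : x ∈ xs <;>
        simp [pvDup, ih, List.nodup_cons, h]

-- ---------- A side ----------

lemma pvIgLoop_eq (r1 r2 : List Int) (h : r1.length = r2.length) (a : Nat) :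
    pvIgLoop r1 r2 (PySem.List.pyRange (a : Int) (r1.length : Int) 1)
      = decide (r1.drop a = r2.drop a) := by
  by_cases ha : a < r1.length
  · rw [PySem.List.pyRange_one_cons (by exact_mod_cast ha)]
    have h2 : a < r2.length := h ▸ ha
    have g1 : r1.getD a 0 = r1[a]'ha := List.getD_eq_getElem r1 0 ha
    have g2 : r2.getD a 0 = r2[a]'h2 := List.getD_eq_getElem r2 0 h2
    simp only [pvIgLoop, PySem.List.pyGetD_natCast, g1, g2]
    have e1 : ((a : Int) + 1) = ((a + 1 : Nat) : Int) := by push_cast; ring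
    rw [e1, pvIgLoop_eq r1 r2 h (a + 1)]
    have hiff : (r1.drop a = r2.drop a)
        ↔ (r1[a]'ha = r2[a]'h2 ∧ r1.drop (a + 1) = r2.drop (a + 1)) := by
      rw [List.drop_eq_getElem_cons ha, List.drop_eq_getElem_cons h2, List.cons.injEq]
    by_cases he : r1[a]'ha = r2[a]'h2
    · rw [if_neg (not_not_intro he), decide_eq_decide, hiff]
      simp [he]
    · rw [if_pos he]
      symm
      rw [decide_eq_false_iff_not, hiff]
      exact fun h' => he h'.1
  · rw [PySem.List.pyRange_one_eq_nil (by exact_mod_cast Nat.le_of_not_lt ha)]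
    have d1 : r1.drop a = [] := List.drop_eq_nil_of_le (Nat.le_of_not_lt ha)
    have d2 : r2.drop a = [] := List.drop_eq_nil_of_le (h ▸ Nat.le_of_not_lt ha)
    simp [pvIgLoop, d1, d2]
termination_by r1.length - a

lemma iguales_eq (r1 r2 : List Int) : iguales r1 r2 = decide (r1 = r2) := by
  by_cases h : r1.length = r2.length
  · have h0 := pvIgLoop_eq r1 r2 h 0
    simp only [Int.natCast_zero, List.drop_zero] at h0
    unfold iguales
    rw [if_neg (not_not_intro h)]
    exact h0
  · have : r1 ≠ r2 := fun e => h (e ▸ rfl)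
    simp [iguales, h, this]

lemma pvJLoop_eq (ind : List (List Int)) (temp : List Int) (a : Nat) :
    pvJLoop ind temp (PySem.List.pyRange (a : Int) (ind.length : Int) 1)
      = decide (temp ∈ ind.drop a) := by
  by_cases ha : a < ind.length
  · rw [PySem.List.pyRange_one_cons (by exact_mod_cast ha)]
    have g : ind.getD a [] = ind[a]'ha := List.getD_eq_getElem ind [] ha
    simp only [pvJLoop, PySem.List.pyGetD_natCast, g, iguales_eq]
    have e1 : ((a : Int) + 1) = ((a + 1 : Nat) : Int) := by push_cast; ring
    have hiff : (temp ∈ ind.drop a) ↔ (temp = ind[a]'ha ∨ temp ∈ ind.drop (a + 1)) := by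
      rw [List.drop_eq_getElem_cons ha, List.mem_cons]
    by_cases he : temp = ind[a]'ha
    · rw [if_pos (by simp [he])]
      symm
      rw [decide_eq_true_eq, hiff]
      exact Or.inl he
    · rw [if_neg (by simp [he]), e1, pvJLoop_eq ind temp (a + 1), decide_eq_decide, hiff]
      simp [he]
  · rw [PySem.List.pyRange_one_eq_nil (by exact_mod_cast Nat.le_of_not_lt ha)]
    simp [pvJLoop, List.drop_eq_nil_of_le (Nat.le_of_not_lt ha)]
termination_by ind.length - a

lemma pvILoop_eq (ind : List (List Int)) (a : Nat) :
    pvILoop ind (PySem.List.pyRange (a : Int) ((ind.length : Int) - 1) 1)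
      = pvDup (ind.drop a) := by
  by_cases ha : a + 1 < ind.length
  · rw [PySem.List.pyRange_one_cons (by omega)]
    have ha' : a < ind.length := by omega
    have g : ind.getD a [] = ind[a]'ha' := List.getD_eq_getElem ind [] ha'
    simp only [pvILoop, PySem.List.pyGetD_natCast, g]
    have e1 : ((a : Int) + 1) = ((a + 1 : Nat) : Int) := by push_cast; ring
    rw [e1, pvJLoop_eq ind _ (a + 1), pvILoop_eq ind (a + 1),
        show ind.drop a = ind[a]'ha' :: ind.drop (a + 1) from List.drop_eq_getElem_cons ha']
    simp only [pvDup]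
    by_cases hm : ind[a]'ha' ∈ ind.drop (a + 1)
    · rw [if_pos (by simp [hm])]
      symm
      simp [hm]
    · rw [if_neg (by simp [hm])]
      simp [hm]
  · rw [PySem.List.pyRange_one_eq_nil (by omega)]
    have hlen : (ind.drop a).length ≤ 1 := by
      have := List.length_drop (l := ind) (i := a); omega
    match hd : ind.drop a with
    | [] => simp [pvILoop, pvDup]
    | [x] => simp [pvILoop, pvDup]
    | x :: y :: t => rw [hd] at hlen; simp at hlen
termination_by ind.length - a

lemma rutas_repetidas_eq (ind : List (List Int)) :
    rutas_repetidas ind = decide (¬ ind.Nodup) := by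
  have := pvILoop_eq ind 0
  simp only [Int.natCast_zero, List.drop_zero] at this
  rw [rutas_repetidas, this, pvDup_eq_not_nodup]

-- ---------- B side ----------

lemma pvSame_eq (r1 r2 : List Int) (h : r1.length = r2.length) :
    pvSame r1 r2 = decide (r1 = r2) := by
  induction r1 generalizing r2 with
  | nil => cases r2 with
      | nil => simp [pvSame]
      | cons y ys => simp at h
  | cons x xs ih =>
      cases r2 with
      | nil => simp at h
      | cons y ys =>
          simp only [List.length_cons, Nat.add_right_cancel_iff] at h
          by_cases he : x = y
          · simp [pvSame, he, ih ys h]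
          · simp [pvSame, he]

lemma pvScanBucket_eq (r : List Int) (bucket : List (List Int))
    (h : ∀ s ∈ bucket, s.length = r.length) :
    pvScanBucket r bucket = decide (r ∈ bucket) := by
  induction bucket with
  | nil => simp [pvScanBucket]
  | cons s rest ih =>
      have hs : s.length = r.length := h s (by simp)
      by_cases he : s = r
      · subst he
        simp [pvScanBucket, pvSame_eq s s rfl]
      · simp [pvScanBucket, pvSame_eq s r hs, he,
              ih (fun t ht => h t (by simp [ht])), eq_comm (a := r)]

-- "seen" loop abstracted from the dict
def pvMemDup (S : List (List Int)) : List (List Int) → Bool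
  | [] => false
  | r :: rest => if r ∈ S then true else pvMemDup (S ++ [r]) rest

lemma pvMemDup_eq (S l : List (List Int)) (hS : S.Nodup) :
    pvMemDup S l = decide (¬ (S ++ l).Nodup) := by
  induction l generalizing S with
  | nil => simp [pvMemDup, hS]
  | cons r rest ih =>
      by_cases hm : r ∈ S
      · have : ¬ (S ++ r :: rest).Nodup := by
          intro hn
          exact (List.disjoint_of_nodup_append hn) hm (by simp)
        simp [pvMemDup, hm, this]
      · have hS' : (S ++ [r]).Nodup := by
          rw [List.nodup_append]
          refine ⟨hS, List.nodup_singleton r, ?_⟩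
          intro a haS b hb
          simp only [List.mem_singleton] at hb
          subst hb
          exact fun e => hm (e ▸ haS)
        rw [pvMemDup, if_neg hm, ih (S ++ [r]) hS', List.append_assoc,
            List.singleton_append]

-- invariant tying the dict of buckets to the flat "seen" list
def pvInv (bkt : PySem.Dict Int (List (List Int))) (S : List (List Int)) : Prop :=
  (∀ r : List Int, r ∈ bkt.getD (r.length : Int) [] ↔ r ∈ S) ∧
  (∀ (k : Int) (s : List Int), s ∈ bkt.getD k [] → (s.length : Int) = k)

lemma pvBLoop_eq (l : List (List Int)) (bkt : PySem.Dict Int (List (List Int)))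
    (S : List (List Int)) (h : pvInv bkt S) : pvBLoop bkt l = pvMemDup S l := by
  induction l generalizing bkt S with
  | nil => simp [pvBLoop, pvMemDup]
  | cons r rest ih =>
      obtain ⟨h1, h2⟩ := h
      have hb : ∀ s ∈ bkt.getD (r.length : Int) [], s.length = r.length := by
        intro s hs; exact_mod_cast h2 _ s hs
      rw [pvBLoop, pvMemDup, pvScanBucket_eq r _ hb]
      by_cases hm : r ∈ S
      · simp [(h1 r).2 hm, hm]
      · have hmb : r ∉ bkt.getD (r.length : Int) [] := fun hc => hm ((h1 r).1 hc)
        simp only [hmb, decide_false, if_false, hm]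
        apply ih
        constructor
        · intro r'
          rw [PySem.Dict.getD_insert]
          by_cases hk : (r'.length : Int) = (r.length : Int)
          · rw [if_pos hk]
            have hbkt : r' ∈ bkt.getD ((r.length : Int)) [] ↔ r' ∈ S := by
              rw [← hk]; exact h1 r'
            simp [List.mem_append, hbkt]
          · rw [if_neg hk]
            have hne : r' ≠ r := fun e => hk (by rw [e])
            simp [List.mem_append, h1 r', hne]
        · intro k s hs
          rw [PySem.Dict.getD_insert] at hs
          by_cases hk : k = (r.length : Int)
          · subst hk
            simp only [if_true] at hs
            rcases List.mem_append.1 hs with hc | hc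
            · exact h2 _ s hc
            · rw [List.mem_singleton.1 hc]
          · rw [if_neg hk] at hs
            exact h2 k s hs

lemma rutas_repetidas_alt_eq (ind : List (List Int)) :
    rutas_repetidas_alt ind = decide (¬ ind.Nodup) := by
  rw [rutas_repetidas_alt, pvBLoop_eq ind PySem.Dict.empty []]
  · rw [pvMemDup_eq [] ind List.nodup_nil]; simp
  · constructor
    · intro r; simp [PySem.Dict.getD, PySem.Dict.get?, PySem.Dict.empty]
    · intro k s hs; simp [PySem.Dict.getD, PySem.Dict.get?, PySem.Dict.empty] at hs

-- ===== VERDICT (by name: the statement is the Claim_ definition above) =====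
theorem rutas_repetidas_spec : Claim_equal_rutas_repetidas := by
  intro ind _
  unfold Spec_rutas_repetidas
  rw [rutas_repetidas_eq, rutas_repetidas_alt_eq]
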